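-- pv_equiv track=rewrite | github.com/henriksson-lab/minimap2-pure-rs | scripts/conformance_matrix.py | normalize_sam_core
-- ===== SOURCE A (Python) =====
-- SAM_TAGS = ("RG", "NM", "AS", "ms", "nn", "ts")
--
-- def selected_tags(fields: list[str], wanted: tuple[str, ...]) -> list[str]:
--     tags = {}
--     for field in fields:
--         parts = field.split(":", 2)
--         if len(parts) == 3:
--             tags[parts[0]] = field
--     return [tags[tag] for tag in wanted if tag in tags]
--
-- def normalize_sam_core(lines: list[str]) -> list[str]:
--     out = []
--     for line in lines:
--         if line.startswith("@"):
--             continue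
--         fields = line.split("\t")
--         out.append("\t".join([*fields[:6], *selected_tags(fields[11:], SAM_TAGS)]))
--     return out
-- ===== SOURCE B (Python) =====
-- SAM_TAGS = ("RG", "NM", "AS", "ms", "nn", "ts")
--
-- def _first_match(rev_fields, tag):
--     for field in rev_fields:
--         parts = field.split(":", 2)
--         if len(parts) == 3 and parts[0] == tag:
--             return field
--     return None
--
-- def _normalize_line(line):
--     fields = line.split("\t")
--     rev = fields[11:][::-1]
--     picked = [m for m in (_first_match(rev, tag) for tag in SAM_TAGS) if m is not None]
--     return "\t".join(fields[:6] + picked)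
--
-- def normalize_sam_core(lines):
--     return [_normalize_line(line) for line in lines if not line.startswith("@")]
-- ===== Notes on version B (the rewrite author's own statement) =====
-- stated objective: alternative
-- what changed: Drops A's build-a-dict-then-select and its explicit accumulator loops: B filters and maps the lines in a comprehension, and picks each wanted tag as the FIRST 3-part match in the REVERSED tail fields (equivalent to dict last-overwrite), no dict at all.
import Mathlib
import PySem

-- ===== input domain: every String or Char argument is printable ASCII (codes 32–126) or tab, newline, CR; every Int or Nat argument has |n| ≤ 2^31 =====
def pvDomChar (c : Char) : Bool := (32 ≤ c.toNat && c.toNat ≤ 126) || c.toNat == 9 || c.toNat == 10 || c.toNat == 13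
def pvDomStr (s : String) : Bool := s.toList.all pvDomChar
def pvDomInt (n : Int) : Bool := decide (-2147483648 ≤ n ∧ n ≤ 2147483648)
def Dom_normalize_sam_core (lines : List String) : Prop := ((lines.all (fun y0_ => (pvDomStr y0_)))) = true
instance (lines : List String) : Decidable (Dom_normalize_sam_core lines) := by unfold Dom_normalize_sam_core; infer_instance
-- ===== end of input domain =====

-- B replaces A's build-a-dict-then-select and accumulator loops by a filter+map comprehension
-- over lines and, per wanted tag, the first 3-part match in the reversed tail fields (alternative, same cost class).

-- ===== PORT A =====
def SAM_TAGS : List String := ["RG", "NM", "AS", "ms", "nn", "ts"]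

def selected_tags (fields : List String) (wanted : List String) : List String :=
  let tags : PySem.Dict String String :=
    fields.foldl (fun d field =>
      match PySem.Str.splitMax? field ":" 2 with
      | some [p0, _p1, _p2] => d.insert p0 field   -- len(parts) == 3
      | _ => d) PySem.Dict.empty
  -- [tags[tag] for tag in wanted if tag in tags]
  wanted.filterMap (fun tag => tags.get? tag)

def normalize_sam_core (lines : List String) : List String :=
  lines.foldl (fun out line =>
    if PySem.Str.startswith line "@" then out
    else
      let fields := (PySem.Str.split? line "\t").getD []   -- split? is some: sep "\t" ≠ ""
      out ++ [PySem.Str.join "\t" (fields.take 6 ++ selected_tags (fields.drop 11) SAM_TAGS)]) []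

-- ===== PORT B =====
-- first field of rev_fields whose split(":",2) has 3 parts with parts[0] == tag (early-return loop)
def first_match (rev_fields : List String) (tag : String) : Option String :=
  rev_fields.find? (fun field =>
    match PySem.Str.splitMax? field ":" 2 with
    | some [p0, _p1, _p2] => p0 == tag
    | _ => false)

def normalize_line (line : String) : String :=
  let fields := (PySem.Str.split? line "\t").getD []   -- split? is some: sep "\t" ≠ ""
  let rev := (fields.drop 11).reverse                  -- fields[11:][::-1]
  let picked := (SAM_TAGS.map (first_match rev)).filterMap id
  PySem.Str.join "\t" (fields.take 6 ++ picked)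

def normalize_sam_core_alt (lines : List String) : List String :=
  (lines.filter (fun line => !PySem.Str.startswith line "@")).map normalize_line

-- ===== PRECONDITION & SPEC =====
def Spec_normalize_sam_core (lines : List String) (out : List String) : Prop := out = normalize_sam_core_alt lines
instance (lines : List String) (out : List String) : Decidable (Spec_normalize_sam_core lines out) := by unfold Spec_normalize_sam_core; infer_instance

-- ===== CLAIM (what is proved, stated in full; the proofs are below) =====
def Claim_equal_normalize_sam_core : Prop := ∀ (lines : List String), Dom_normalize_sam_core lines → Spec_normalize_sam_core lines (normalize_sam_core lines)

-- ===== LEMMAS AND PROOFS =====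

-- the predicate B scans with
def tagPred (tag : String) (field : String) : Bool :=
  match PySem.Str.splitMax? field ":" 2 with
  | some [p0, _p1, _p2] => p0 == tag
  | _ => false

-- A's dict answers each lookup with the last overwrite = first match in the reversed list
lemma get?_build_eq (fields : List String) (tag : String) (d : PySem.Dict String String) :
    (fields.foldl (fun d field =>
      match PySem.Str.splitMax? field ":" 2 with
      | some [p0, _p1, _p2] => d.insert p0 field
      | _ => d) d).get? tag
    = (fields.reverse.find? (tagPred tag)).or (d.get? tag) := by
  induction fields generalizing d with
  | nil => rfl
  | cons f fs ih =>
    simp only [List.foldl_cons, List.reverse_cons, List.find?_append, ih]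
    have hstep : (match PySem.Str.splitMax? f ":" 2 with
        | some [p0, _p1, _p2] => d.insert p0 f
        | _ => d).get? tag = ([f].find? (tagPred tag)).or (d.get? tag) := by
      simp only [List.find?, tagPred]
      rcases h : PySem.Str.splitMax? f ":" 2 with _ | parts
      · simp
      · match parts with
        | [p0, p1, p2] =>
          by_cases hp : p0 = tag
          · subst hp; simp [PySem.Dict.get?_insert_self]
          · have hb : (p0 == tag) = false := beq_false_of_ne hp
            simp [PySem.Dict.get?_insert, Ne.symm hp, hb]
        | [] => simp
        | [a] => simp
        | [a, b] => simp
        | a :: b :: c :: e :: rest => simp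
    rw [hstep, Option.or_assoc]

lemma selected_eq (fields : List String) :
    selected_tags fields SAM_TAGS = (SAM_TAGS.map (first_match fields.reverse)).filterMap id := by
  unfold selected_tags first_match
  simp only [List.filterMap_map, Function.comp_def, id_eq]
  congr 1
  funext tag
  rw [get?_build_eq fields tag PySem.Dict.empty, PySem.Dict.get?_empty, Option.or_none]
  rfl

-- A's append-accumulator loop over lines = filter then map
lemma foldl_filter_map (lines : List String) (c : String → Bool) (g : String → String)
    (acc : List String) :
    lines.foldl (fun out line => if c line then out else out ++ [g line]) acc
    = acc ++ (lines.filter (fun line => !c line)).map g := by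
  induction lines generalizing acc with
  | nil => simp
  | cons l ls ih =>
    simp only [List.foldl_cons, List.filter_cons]
    by_cases h : c l <;> simp [h, ih]

-- ===== VERDICT (by name: the statement is the Claim_ definition above) =====
theorem normalize_sam_core_spec : Claim_equal_normalize_sam_core := by
  intro lines _
  unfold Spec_normalize_sam_core normalize_sam_core normalize_sam_core_alt
  rw [foldl_filter_map]
  simp only [List.nil_append]
  congr 1
  funext line
  unfold normalize_line
  rw [selected_eq]
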